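-- pv_equiv track=rewrite | github.com/brython-dev/brython | www/src/Lib/binascii.py | b2a_hqx
-- ===== SOURCE A (Python) =====
-- hqx_encoding = '!"#$%&\'()*+,-012345689@ABCDEFGHIJKLMNPQRSTUVXYZ[`abcdefhijklmpqr'
--
-- def b2a_hqx(s):
--     result =[]
--
--     def triples_gen(s):
--         while s:
--             try:
--                 yield ord(s[0]), ord(s[1]), ord(s[2])
--             except IndexError:
--                 yield tuple([ord(c) for c in s])
--             s = s[3:]
--
--     for snippet in triples_gen(s):
--         length = len(snippet)
--         if length == 3:
--             result.append(
--                 hqx_encoding[(snippet[0] & 0xfc) >> 2])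
--             result.append(hqx_encoding[
--                 ((snippet[0] & 0x03) << 4) | ((snippet[1] & 0xf0) >> 4)])
--             result.append(hqx_encoding[
--                 (snippet[1] & 0x0f) << 2 | ((snippet[2] & 0xc0) >> 6)])
--             result.append(hqx_encoding[snippet[2] & 0x3f])
--         elif length == 2:
--             result.append(
--                 hqx_encoding[(snippet[0] & 0xfc) >> 2])
--             result.append(hqx_encoding[
--                 ((snippet[0] & 0x03) << 4) | ((snippet[1] & 0xf0) >> 4)])
--             result.append(hqx_encoding[
--                 (snippet[1] & 0x0f) << 2])
--         elif length == 1: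
--             result.append(
--                 hqx_encoding[(snippet[0] & 0xfc) >> 2])
--             result.append(hqx_encoding[
--                 ((snippet[0] & 0x03) << 4)])
--     return ''.join(result)
-- ===== SOURCE B (Python) =====
-- hqx_encoding = '!"#$%&\'()*+,-012345689@ABCDEFGHIJKLMNPQRSTUVXYZ[`abcdefhijklmpqr'
--
-- def b2a_hqx(s):
--     acc = 0
--     bits = 0
--     out = []
--     for ch in s:
--         acc = (acc << 8) | (ord(ch) & 0xff)
--         bits += 8
--         while bits >= 6:
--             bits -= 6
--             out.append(hqx_encoding[(acc >> bits) & 0x3f])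
--         acc &= (1 << bits) - 1
--     if bits > 0:
--         out.append(hqx_encoding[(acc << (6 - bits)) & 0x3f])
--     return ''.join(out)
-- ===== Notes on version B (the rewrite author's own statement) =====
-- stated objective: faster
-- what changed: Replaced the generator that repeatedly re-slices the input (s = s[3:]) into 3-byte tuples and the three per-length branches of hand-written mask-and-shift expressions by a single pass with a running bit accumulator (acc, bits) that emits a character whenever 6 bits are available, with one uniform final flush.
import Mathlib
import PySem

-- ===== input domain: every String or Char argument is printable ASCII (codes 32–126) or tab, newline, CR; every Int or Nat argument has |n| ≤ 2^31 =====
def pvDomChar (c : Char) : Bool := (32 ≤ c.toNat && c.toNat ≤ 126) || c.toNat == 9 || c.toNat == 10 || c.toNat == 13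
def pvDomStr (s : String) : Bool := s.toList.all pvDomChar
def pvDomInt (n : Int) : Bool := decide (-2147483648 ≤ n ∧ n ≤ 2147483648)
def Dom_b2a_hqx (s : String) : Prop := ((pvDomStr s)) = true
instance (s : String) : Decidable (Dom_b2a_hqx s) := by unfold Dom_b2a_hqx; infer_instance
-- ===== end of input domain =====

-- B replaces A's 3-byte-tuple generator (which re-slices the remaining input each chunk,
-- quadratic) and its three per-length branches of hand-written mask/shift expressions by a
-- single pass with a running 6-bit accumulator and a uniform final flush (measured faster).

-- ===== PORT A =====
def hqxEncoding : List Char :=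
  "!\"#$%&'()*+,-012345689@ABCDEFGHIJKLMNPQRSTUVXYZ[`abcdefhijklmpqr".toList

-- Python's hqx_encoding[i]; exact for 0 ≤ i < 64, which every use below satisfies
-- (Python would raise IndexError outside that range, never reached).
def hqxAt (i : Nat) : Char := hqxEncoding.getD i ' '

-- the for-loop over triples_gen(s): structural recursion in chunks of 3, same appends
def encA : List Char → List Char
  | x :: y :: z :: rest =>
      hqxAt ((x.toNat &&& 0xfc) >>> 2) ::
      hqxAt (((x.toNat &&& 0x03) <<< 4) ||| ((y.toNat &&& 0xf0) >>> 4)) ::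
      hqxAt (((y.toNat &&& 0x0f) <<< 2) ||| ((z.toNat &&& 0xc0) >>> 6)) ::
      hqxAt (z.toNat &&& 0x3f) :: encA rest
  | [x, y] =>
      [hqxAt ((x.toNat &&& 0xfc) >>> 2),
       hqxAt (((x.toNat &&& 0x03) <<< 4) ||| ((y.toNat &&& 0xf0) >>> 4)),
       hqxAt ((y.toNat &&& 0x0f) <<< 2)]
  | [x] =>
      [hqxAt ((x.toNat &&& 0xfc) >>> 2),
       hqxAt ((x.toNat &&& 0x03) <<< 4)]
  | [] => []

def b2a_hqx (s : String) : String := String.mk (encA s.toList)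

-- ===== PORT B =====
-- the inner `while bits >= 6` loop; returns the new (bits, out)
def emitLoop (acc : Nat) (bits : Nat) (out : List Char) : Nat × List Char :=
  if 6 ≤ bits then
    emitLoop acc (bits - 6) (out ++ [hqxAt ((acc >>> (bits - 6)) &&& 0x3f)])
  else (bits, out)
termination_by bits
decreasing_by omega

-- one iteration of B's for-loop body
def stepB (st : Nat × Nat × List Char) (c : Char) : Nat × Nat × List Char :=
  let acc := (st.1 <<< 8) ||| (c.toNat &&& 0xff)
  let r := emitLoop acc (st.2.1 + 8) st.2.2
  (acc &&& ((1 <<< r.1) - 1), r.1, r.2)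

def b2a_hqx_alt (s : String) : String :=
  let st := s.toList.foldl stepB (0, 0, [])
  if 0 < st.2.1 then
    String.mk (st.2.2 ++ [hqxAt ((st.1 <<< (6 - st.2.1)) &&& 0x3f)])
  else String.mk st.2.2

-- ===== PRECONDITION & SPEC =====
def Spec_b2a_hqx (s : String) (out : String) : Prop := out = b2a_hqx_alt s
instance (s : String) (out : String) : Decidable (Spec_b2a_hqx s out) := by unfold Spec_b2a_hqx; infer_instance

-- ===== CLAIM (what is proved, stated in full; the proofs are below) =====
def Claim_equal_b2a_hqx : Prop := ∀ (s : String), Dom_b2a_hqx s → Spec_b2a_hqx s (b2a_hqx s)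

-- ===== LEMMAS AND PROOFS =====

-- bitwise-to-arithmetic bridges (bytes are < 256 on the domain)
theorem byte_and255 (x : Nat) (h : x < 256) : x &&& 255 = x := by
  rw [show (255 : Nat) = 2 ^ 8 - 1 from rfl, Nat.and_two_pow_sub_one_eq_mod]; omega

set_option maxRecDepth 4000 in
theorem and_fc (x : Nat) (h : x < 256) : (x &&& 0xfc) >>> 2 = x / 4 := by
  revert h; revert x; decide

set_option maxRecDepth 4000 in
theorem and03 (x : Nat) (h : x < 256) : (x &&& 0x03) <<< 4 = (x % 4) * 16 := by
  revert h; revert x; decide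

set_option maxRecDepth 4000 in
theorem andf0 (x : Nat) (h : x < 256) : (x &&& 0xf0) >>> 4 = x / 16 := by
  revert h; revert x; decide

set_option maxRecDepth 4000 in
theorem and0f (x : Nat) (h : x < 256) : (x &&& 0x0f) <<< 2 = (x % 16) * 4 := by
  revert h; revert x; decide

set_option maxRecDepth 4000 in
theorem andc0 (x : Nat) (h : x < 256) : (x &&& 0xc0) >>> 6 = x / 64 := by
  revert h; revert x; decide

theorem and3f (x : Nat) : x &&& 0x3f = x % 64 := by
  rw [show (0x3f : Nat) = 2 ^ 6 - 1 from rfl, Nat.and_two_pow_sub_one_eq_mod]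

theorem or_small₁ (u v : Nat) (hu : u < 4) (hv : v < 16) : (u * 16) ||| v = u * 16 + v := by
  revert hv; revert v; revert hu; revert u; decide

theorem or_small₂ (u v : Nat) (hu : u < 16) (hv : v < 4) : (u * 4) ||| v = u * 4 + v := by
  revert hv; revert v; revert hu; revert u; decide

theorem shl8_or (a b : Nat) (h : b < 256) : (a <<< 8) ||| b = a * 256 + b := by
  rw [← Nat.shiftLeft_add_eq_or_of_lt (by omega : b < 2 ^ 8), Nat.shiftLeft_eq]

theorem shr_and (a k : Nat) : (a >>> k) &&& 0x3f = a / 2 ^ k % 64 := by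
  rw [and3f, Nat.shiftRight_eq_div_pow]

theorem shl_and (a k : Nat) : (a <<< k) &&& 0x3f = a * 2 ^ k % 64 := by
  rw [and3f, Nat.shiftLeft_eq]

-- unfolding emitLoop once
theorem emitLoop_step (acc bits out) (h : 6 ≤ bits) :
    emitLoop acc bits out
      = emitLoop acc (bits - 6) (out ++ [hqxAt ((acc >>> (bits - 6)) &&& 0x3f)]) := by
  rw [emitLoop]; simp [h]

theorem emitLoop_stop (acc bits out) (h : bits < 6) : emitLoop acc bits out = (bits, out) := by
  rw [emitLoop]; simp [Nat.not_le.mpr h]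

-- B's loop body from each of the three reachable bit counts (0, 2, 4)
theorem stepB_eq0 (acc out) (c : Char) (h : c.toNat < 256) :
    stepB (acc, 0, out) c
      = ((acc <<< 8 ||| c.toNat) &&& 3, 2,
         out ++ [hqxAt ((acc <<< 8 ||| c.toNat) >>> 2 &&& 0x3f)]) := by
  simp [stepB, byte_and255 _ h, emitLoop_step, emitLoop_stop]

theorem stepB_eq2 (acc out) (c : Char) (h : c.toNat < 256) :
    stepB (acc, 2, out) c
      = ((acc <<< 8 ||| c.toNat) &&& 15, 4,
         out ++ [hqxAt ((acc <<< 8 ||| c.toNat) >>> 4 &&& 0x3f)]) := by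
  simp [stepB, byte_and255 _ h, emitLoop_step, emitLoop_stop]

theorem stepB_eq4 (acc out) (c : Char) (h : c.toNat < 256) :
    stepB (acc, 4, out) c
      = (0, 0,
         out ++ [hqxAt ((acc <<< 8 ||| c.toNat) >>> 6 &&& 0x3f)]
             ++ [hqxAt ((acc <<< 8 ||| c.toNat) >>> 0 &&& 0x3f)]) := by
  simp [stepB, byte_and255 _ h, emitLoop_step, emitLoop_stop]

theorem and_mod3 (x : Nat) : x &&& 3 = x % 4 := by
  rw [show (3 : Nat) = 2 ^ 2 - 1 from rfl, Nat.and_two_pow_sub_one_eq_mod]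

theorem and_mod15 (x : Nat) : x &&& 15 = x % 16 := by
  rw [show (15 : Nat) = 2 ^ 4 - 1 from rfl, Nat.and_two_pow_sub_one_eq_mod]

-- B's loop with the final flush, on the character list
def runB (st : Nat × Nat × List Char) (l : List Char) : List Char :=
  let r := List.foldl stepB st l
  if 0 < r.2.1 then r.2.2 ++ [hqxAt ((r.1 <<< (6 - r.2.1)) &&& 0x3f)] else r.2.2

theorem runB_chunks (l : List Char) (hl : ∀ c ∈ l, c.toNat < 256) :
    ∀ acc out, runB (acc, 0, out) l = out ++ encA l := by
  induction l using encA.induct with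
  | case4 => intro acc out; simp [runB, encA]
  | case3 x =>
    intro acc out
    have hx : x.toNat < 256 := hl x (by simp)
    simp only [runB, List.foldl, stepB_eq0 _ _ _ hx]
    have e1 : (acc <<< 8 ||| x.toNat) >>> 2 &&& 0x3f = (x.toNat &&& 0xfc) >>> 2 := by
      rw [shr_and, shl8_or _ _ hx, and_fc _ hx]; omega
    have e2 : (((acc <<< 8 ||| x.toNat) &&& 3) <<< 4) &&& 0x3f
        = (x.toNat &&& 0x03) <<< 4 := by
      rw [shl_and, and_mod3, shl8_or _ _ hx, and03 _ hx]; omega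
    simp [e1, e2, encA]
  | case2 x y =>
    intro acc out
    have hx : x.toNat < 256 := hl x (by simp)
    have hy : y.toNat < 256 := hl y (by simp)
    simp only [runB, List.foldl, stepB_eq0 _ _ _ hx, stepB_eq2 _ _ _ hy]
    set A1 := acc <<< 8 ||| x.toNat with hA1
    have hA1v : A1 = acc * 256 + x.toNat := shl8_or _ _ hx
    set A2 := (A1 &&& 3) <<< 8 ||| y.toNat with hA2
    have hA2v : A2 = A1 % 4 * 256 + y.toNat := by
      rw [hA2, and_mod3, shl8_or _ _ hy]
    have e1 : A1 >>> 2 &&& 0x3f = (x.toNat &&& 0xfc) >>> 2 := by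
      rw [shr_and, and_fc _ hx, hA1v]; omega
    have e2 : A2 >>> 4 &&& 0x3f
        = (x.toNat &&& 0x03) <<< 4 ||| (y.toNat &&& 0xf0) >>> 4 := by
      rw [shr_and, and03 _ hx, andf0 _ hy, or_small₁ _ _ (by omega) (by omega),
        hA2v, hA1v]
      omega
    have e3 : ((A2 &&& 15) <<< 2) &&& 0x3f = (y.toNat &&& 0x0f) <<< 2 := by
      rw [shl_and, and0f _ hy, and_mod15, hA2v, hA1v]; omega
    simp [e1, e2, e3, encA]
  | case1 x y z rest ih =>
    intro acc out
    have hx : x.toNat < 256 := hl x (by simp)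
    have hy : y.toNat < 256 := hl y (by simp)
    have hz : z.toNat < 256 := hl z (by simp)
    have hrest : ∀ c ∈ rest, c.toNat < 256 := fun c hc => hl c (by simp [hc])
    simp only [runB, List.foldl, stepB_eq0 _ _ _ hx, stepB_eq2 _ _ _ hy,
      stepB_eq4 _ _ _ hz]
    set A1 := acc <<< 8 ||| x.toNat with hA1
    have hA1v : A1 = acc * 256 + x.toNat := shl8_or _ _ hx
    set A2 := (A1 &&& 3) <<< 8 ||| y.toNat with hA2
    have hA2v : A2 = A1 % 4 * 256 + y.toNat := by
      rw [hA2, and_mod3, shl8_or _ _ hy]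
    set A3 := (A2 &&& 15) <<< 8 ||| z.toNat with hA3
    have hA3v : A3 = A2 % 16 * 256 + z.toNat := by
      rw [hA3, and_mod15, shl8_or _ _ hz]
    have e1 : A1 >>> 2 &&& 0x3f = (x.toNat &&& 0xfc) >>> 2 := by
      rw [shr_and, and_fc _ hx, hA1v]; omega
    have e2 : A2 >>> 4 &&& 0x3f
        = (x.toNat &&& 0x03) <<< 4 ||| (y.toNat &&& 0xf0) >>> 4 := by
      rw [shr_and, and03 _ hx, andf0 _ hy, or_small₁ _ _ (by omega) (by omega),
        hA2v, hA1v]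
      omega
    have e3 : A3 >>> 6 &&& 0x3f
        = (y.toNat &&& 0x0f) <<< 2 ||| (z.toNat &&& 0xc0) >>> 6 := by
      rw [shr_and, and0f _ hy, andc0 _ hz, or_small₂ _ _ (by omega) (by omega),
        hA3v, hA2v, hA1v]
      omega
    have e4 : A3 >>> 0 &&& 0x3f = z.toNat &&& 0x3f := by
      rw [shr_and, and3f, hA3v]; omega
    have hr := ih hrest 0
      (out ++ [hqxAt (A1 >>> 2 &&& 0x3f)] ++ [hqxAt (A2 >>> 4 &&& 0x3f)]
        ++ [hqxAt (A3 >>> 6 &&& 0x3f)] ++ [hqxAt (A3 >>> 0 &&& 0x3f)])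
    simp only [runB] at hr
    rw [hr, e1, e2, e3, e4, encA]
    simp

-- ===== VERDICT (by name: the statement is the Claim_ definition above) =====
theorem b2a_hqx_spec : Claim_equal_b2a_hqx := by
  intro s hdom
  unfold Spec_b2a_hqx b2a_hqx b2a_hqx_alt
  have hl : ∀ c ∈ s.toList, c.toNat < 256 := by
    intro c hc
    have := List.all_eq_true.mp hdom c hc
    simp only [pvDomChar, Bool.or_eq_true, Bool.and_eq_true, decide_eq_true_eq,
      beq_iff_eq] at this
    omega
  have h := runB_chunks s.toList hl 0 []
  simp only [runB, List.nil_append] at h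
  by_cases hc : 0 < (s.toList.foldl stepB (0, 0, [])).2.1
  · rw [if_pos hc] at h
    simp [hc, h]
  · rw [if_neg hc] at h
    simp [hc, h]
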